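-- pv_equiv track=rewrite | github.com/adamsapple/temp-humidity-exporter | src/thexporter/scanthread.py | _candidate_address_types
-- ===== SOURCE A (Python) =====
-- def _candidate_address_types(address_type: str | None) -> list[str | None]:
--     """Return the addrType values to try for a GATT connection."""
--     candidates: list[str | None] = []
--     normalized = address_type if address_type in {"public", "random"} else None
--     if normalized is not None:
--         candidates.append(normalized)
--         candidates.append("random" if normalized == "public" else "public")
--     candidates.append(None)
--
--     seen: set[str | None] = set()
--     ordered: list[str | None] = []
--     for candidate in candidates:
--         if candidate in seen:
--             continue
--         seen.add(candidate)
--         ordered.append(candidate)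
--     return ordered
-- ===== SOURCE B (Python) =====
-- def _candidate_address_types(address_type):
--     # Direct dispatch over the three possible orderings; no dedup needed.
--     if address_type == "public":
--         return ["public", "random", None]
--     if address_type == "random":
--         return ["random", "public", None]
--     return [None]
-- ===== Notes on version B (the rewrite author's own statement) =====
-- stated objective: simpler
-- what changed: B replaces A's build-then-dedup (candidate list plus a seen-set loop) with a direct three-way case dispatch returning the fixed literal list for each case.
import Mathlib
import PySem

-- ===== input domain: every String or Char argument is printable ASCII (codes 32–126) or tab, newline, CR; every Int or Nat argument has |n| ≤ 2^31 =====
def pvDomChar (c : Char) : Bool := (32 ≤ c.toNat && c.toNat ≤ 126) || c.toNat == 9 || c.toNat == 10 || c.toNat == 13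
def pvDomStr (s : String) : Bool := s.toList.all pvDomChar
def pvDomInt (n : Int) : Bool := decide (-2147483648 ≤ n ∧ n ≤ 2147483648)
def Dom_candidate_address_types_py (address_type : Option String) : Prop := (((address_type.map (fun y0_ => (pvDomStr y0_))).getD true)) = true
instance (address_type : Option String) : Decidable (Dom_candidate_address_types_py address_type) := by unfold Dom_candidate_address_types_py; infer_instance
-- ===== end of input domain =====

-- B replaces A's build-then-dedup with a direct three-way case dispatch (objective: simpler).


-- ===== PORT A =====
def candidate_address_types_py (address_type : Option String) : List (Option String) :=
  -- normalized = address_type if address_type in {"public", "random"} else None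
  let normalized : Option String :=
    if address_type = some "public" ∨ address_type = some "random" then address_type else none
  -- candidates built by appends
  let candidates : List (Option String) :=
    if normalized ≠ none then
      ([] : List (Option String)) ++ [normalized]
        ++ [if normalized = some "public" then some "random" else some "public"]
    else ([] : List (Option String))
  let candidates := candidates ++ [none]
  -- dedup loop with a seen set and an ordered accumulator
  (candidates.foldl
    (fun (st : PySem.Set (Option String) × List (Option String)) c =>
      if st.1.contains c then st else (st.1.add c, st.2 ++ [c]))
    (PySem.Set.empty, [])).2

-- ===== PORT B =====
def candidate_address_types_py_alt (address_type : Option String) : List (Option String) :=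
  if address_type = some "public" then [some "public", some "random", none]
  else if address_type = some "random" then [some "random", some "public", none]
  else [none]

-- ===== PRECONDITION & SPEC =====
def Spec_candidate_address_types_py (address_type : Option String) (out : List (Option String)) : Prop := out = candidate_address_types_py_alt address_type
instance (address_type : Option String) (out : List (Option String)) : Decidable (Spec_candidate_address_types_py address_type out) := by unfold Spec_candidate_address_types_py; infer_instance

-- ===== CLAIM (what is proved, stated in full; the proofs are below) =====
def Claim_equal_candidate_address_types_py : Prop := ∀ (address_type : Option String), Dom_candidate_address_types_py address_type → Spec_candidate_address_types_py address_type (candidate_address_types_py address_type)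

-- ===== LEMMAS AND PROOFS =====

-- ===== VERDICT (by name: the statement is the Claim_ definition above) =====
theorem candidate_address_types_py_spec : Claim_equal_candidate_address_types_py := by
  intro a _
  unfold Spec_candidate_address_types_py candidate_address_types_py candidate_address_types_py_alt
  by_cases h1 : a = some "public"
  · subst h1; decide
  · by_cases h2 : a = some "random"
    · subst h2; decide
    · simp [h1, h2, PySem.Set.contains, PySem.Set.empty]
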